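-- pv_equiv track=rewrite | github.com/abdelaha/Google_Foobar_Challenge | rusty_calc.py | answer
-- ===== SOURCE A (Python) =====
-- def answer(str):
--      # your code here
--     # Note: * has a highest priority than +
--     #       * in the most right has highest priority than the ones in the left
--     #       i.e. (2*4*3) = (2*(4*3)) it does not matter from the value pres. though.
--     #   Data structure
--     #   list of *, list of +, list of numbers, and the output str.
--     #   Algorithm:
--     #   1. read char from right
--     #   2. Based of its type put it in its list
--     #   3. if it is + or EOF, flush number list to output str, then * list.
--     #   4. repeat 1-3 till input str is empty
--     #   5. flush + list in the output str
--     #initialization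
--     outStr = ''
--     plusList = ''
--     multList = ''
--     numberList = ''
--     for c in str:
--         if c == '+':
--             #Step #3
--             plusList += c  #add + to the list
--             #flush numb and mult lists
--             outStr += numberList
--             numberList = ''
--             outStr += multList
--             multList = ''
--         elif c == '*':
--             multList += c
--         else:
--             numberList += c
--     outStr += numberList
--     outStr += multList
--     outStr += plusList
--     return outStr
-- ===== SOURCE B (Python) =====
-- def answer(str):
--     out = []
--     for group in str.split('+'):
--         out.append(''.join(c for c in group if c != '*'))
--         out.append(''.join(c for c in group if c == '*'))
--     return ''.join(out) + '+' * str.count('+')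
-- ===== Notes on version B (the rewrite author's own statement) =====
-- stated objective: simpler
-- what changed: Replaces the streaming character router with four accumulator strings and flush-on-'+' by split-on-'+' followed by a per-group two-pass reconstruction (non-'*' chars then '*' chars), appending '+'*count at the end.
import Mathlib
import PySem

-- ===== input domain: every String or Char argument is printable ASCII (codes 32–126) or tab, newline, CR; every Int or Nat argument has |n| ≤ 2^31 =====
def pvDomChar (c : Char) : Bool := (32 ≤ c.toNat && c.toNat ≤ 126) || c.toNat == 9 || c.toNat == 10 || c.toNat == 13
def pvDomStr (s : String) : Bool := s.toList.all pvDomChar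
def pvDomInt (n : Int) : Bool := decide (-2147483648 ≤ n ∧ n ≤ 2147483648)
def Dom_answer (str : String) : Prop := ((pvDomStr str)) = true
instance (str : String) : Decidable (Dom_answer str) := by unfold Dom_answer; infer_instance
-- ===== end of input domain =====

-- B rearranges each '+'-separated group in two filtered passes instead of A's single routing loop; same output, simpler decomposition.

-- ===== PORT A =====
-- literal port of A's loop: state (outStr, plusList, multList, numberList), flush on '+'
def answerLoop (cs : List Char) (outS plus mult num : List Char) : List Char :=
  match cs with
  | [] => outS ++ num ++ mult ++ plus
  | c :: rest =>
    if c = '+' then answerLoop rest (outS ++ num ++ mult) (plus ++ [c]) [] []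
    else if c = '*' then answerLoop rest outS plus (mult ++ [c]) num
    else answerLoop rest outS plus mult (num ++ [c])

def answer (str : String) : String := String.mk (answerLoop str.toList [] [] [] [])

-- ===== PORT B =====
-- str.split('+') : first group and the remaining groups
def splitPlus (cs : List Char) : List Char × List (List Char) :=
  match cs with
  | [] => ([], [])
  | c :: rest =>
    let (g, gs) := splitPlus rest
    if c = '+' then ([], g :: gs) else (c :: g, gs)

-- per group: the non-'*' characters in order, then the '*' characters
def perGroup (g : List Char) : List Char :=
  g.filter (fun c => c ≠ '*') ++ g.filter (fun c => c = '*')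

def answer_alt (str : String) : String :=
  let (g, gs) := splitPlus str.toList
  String.mk (perGroup g ++ gs.flatMap perGroup ++ List.replicate (str.toList.count '+') '+')

-- ===== PRECONDITION & SPEC =====
def Spec_answer (str : String) (out : String) : Prop := out = answer_alt str
instance (str : String) (out : String) : Decidable (Spec_answer str out) := by unfold Spec_answer; infer_instance

-- ===== CLAIM (what is proved, stated in full; the proofs are below) =====
def Claim_equal_answer : Prop := ∀ (str : String), Dom_answer str → Spec_answer str (answer str)

-- ===== LEMMAS AND PROOFS =====
theorem answerLoop_key (cs : List Char) : ∀ (outS plus mult num : List Char),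
    answerLoop cs outS plus mult num =
      outS ++ num ++ (splitPlus cs).1.filter (fun c => c ≠ '*') ++ mult ++
        (splitPlus cs).1.filter (fun c => c = '*') ++
        (splitPlus cs).2.flatMap perGroup ++ plus ++ List.replicate (cs.count '+') '+' := by
  induction cs with
  | nil => intro outS plus mult num; simp [answerLoop, splitPlus]
  | cons c rest ih =>
    intro outS plus mult num
    by_cases hp : c = '+'
    · subst hp
      simp only [answerLoop, if_pos rfl, splitPlus, ih]
      simp [perGroup, List.count_cons, List.replicate_succ, List.replicate_succ']
    · by_cases hm : c = '*'
      · subst hm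
        simp [answerLoop, splitPlus, ih]
      · simp [answerLoop, splitPlus, ih, hp, hm]

-- ===== VERDICT (by name: the statement is the Claim_ definition above) =====
theorem answer_spec : Claim_equal_answer := by
  intro str _
  unfold Spec_answer answer answer_alt
  rw [answerLoop_key]
  simp [perGroup]
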